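-- pv_equiv track=rewrite | github.com/inha-cvl/mobinha | selfdrive/planning/src/kiapi_event.py | eventCheck
-- ===== SOURCE A (Python) =====
-- def eventCheck(future_ids, event_dict): #for testing
--     event = None
--     cnt = 0
--     for _, e_id in event_dict.items():
--         cnt += 1
--         if e_id in future_ids:
--             event = cnt
--             #1: 'Car1', 2: 'Car2', 3: 'Pedestrian1', 4: 'Pedestrian2', 5: 'Bump',6: 'Accident', ( real )
--     return event
-- ===== SOURCE B (Python) =====
-- def eventCheck(future_ids, event_dict):
--     vals = list(event_dict.values())
--     for i in range(len(vals) - 1, -1, -1):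
--         if vals[i] in future_ids:
--             return i + 1
--     return None
-- ===== Notes on version B (the rewrite author's own statement) =====
-- stated objective: alternative
-- what changed: B searches the values backwards from the last index and returns on the first match (early exit), instead of scanning all entries forward while overwriting a running result; Pre_ excludes association lists with duplicate keys, which a Python dict cannot represent.
import Mathlib
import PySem

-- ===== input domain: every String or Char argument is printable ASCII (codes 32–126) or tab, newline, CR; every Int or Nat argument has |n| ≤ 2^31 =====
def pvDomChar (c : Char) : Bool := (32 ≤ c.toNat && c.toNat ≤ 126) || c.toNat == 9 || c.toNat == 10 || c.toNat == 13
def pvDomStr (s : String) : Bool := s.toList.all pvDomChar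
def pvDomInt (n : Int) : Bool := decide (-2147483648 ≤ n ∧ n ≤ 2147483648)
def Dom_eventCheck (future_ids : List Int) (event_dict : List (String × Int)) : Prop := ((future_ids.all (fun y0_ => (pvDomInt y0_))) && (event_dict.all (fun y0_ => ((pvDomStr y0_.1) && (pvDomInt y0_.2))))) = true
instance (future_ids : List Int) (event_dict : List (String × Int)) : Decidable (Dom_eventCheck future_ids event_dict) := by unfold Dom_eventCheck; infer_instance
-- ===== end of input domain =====

-- B replaces A's forward scan that overwrites a running result by a backward scan over the
-- values with an early exit on the first (i.e. last-position) match; same return value.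

-- ===== PORT A =====
-- for _, e_id in event_dict.items(): cnt += 1; if e_id in future_ids: event = cnt
def eventCheck (future_ids : List Int) (event_dict : List (String × Int)) : Option Int :=
  (event_dict.foldl
    (fun (st : Option Int × Int) p =>
      let cnt := st.2 + 1
      (if p.2 ∈ future_ids then some cnt else st.1, cnt))
    (none, 0)).1

-- ===== PORT B =====
-- for i in range(len(vals)-1, -1, -1): if vals[i] in future_ids: return i+1
-- countdown recursion on the index; altGo fids vals (i+1) inspects vals[i] first
def altGo (future_ids : List Int) (vals : List Int) : Nat → Option Int
  | 0 => none
  | (i+1) => if vals.getD i 0 ∈ future_ids then some ((i : Int) + 1) else altGo future_ids vals i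

def eventCheck_alt (future_ids : List Int) (event_dict : List (String × Int)) : Option Int :=
  altGo future_ids (event_dict.map Prod.snd) event_dict.length

-- ===== PRECONDITION & SPEC =====
-- Pre_ excludes association lists with duplicate keys: a Python dict cannot hold them, so such
-- lists do not correspond to any dict input of A (the dict literal collapses duplicates).
def Pre_eventCheck (future_ids : List Int) (event_dict : List (String × Int)) : Prop :=
  (event_dict.map Prod.fst).Nodup
instance (future_ids : List Int) (event_dict : List (String × Int)) : Decidable (Pre_eventCheck future_ids event_dict) := by unfold Pre_eventCheck; infer_instance
def pvWitness_eventCheck : List Int × (List (String × Int)) := ([3, 5], [("a", 1), ("b", 3)])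

def Spec_eventCheck (future_ids : List Int) (event_dict : List (String × Int)) (out : Option Int) : Prop := out = eventCheck_alt future_ids event_dict
instance (future_ids : List Int) (event_dict : List (String × Int)) (out : Option Int) : Decidable (Spec_eventCheck future_ids event_dict out) := by unfold Spec_eventCheck; infer_instance

-- ===== CLAIM (what is proved, stated in full; the proofs are below) =====
def Claim_equal_eventCheck : Prop := ∀ (future_ids : List Int) (event_dict : List (String × Int)), Dom_eventCheck future_ids event_dict → Pre_eventCheck future_ids event_dict → Spec_eventCheck future_ids event_dict (eventCheck future_ids event_dict)

-- ===== LEMMAS AND PROOFS =====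

-- A's fold, rephrased over the values list only (the step ignores the key)
def stepV (future_ids : List Int) (st : Option Int × Int) (v : Int) : Option Int × Int :=
  (if v ∈ future_ids then some (st.2 + 1) else st.1, st.2 + 1)

theorem foldA_eq_foldV (future_ids : List Int) (event_dict : List (String × Int))
    (st : Option Int × Int) :
    event_dict.foldl
      (fun (st : Option Int × Int) p =>
        let cnt := st.2 + 1
        (if p.2 ∈ future_ids then some cnt else st.1, cnt)) st
    = (event_dict.map Prod.snd).foldl (stepV future_ids) st := by
  induction event_dict generalizing st with
  | nil => rfl
  | cons p t ih => simp [List.foldl, stepV, ih]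

theorem foldV_snd (future_ids : List Int) (vals : List Int) (st : Option Int × Int) :
    (vals.foldl (stepV future_ids) st).2 = st.2 + vals.length := by
  induction vals generalizing st with
  | nil => simp
  | cons v t ih => simp [List.foldl, stepV, ih]; ring

theorem altGo_append (future_ids : List Int) (ws : List Int) (x : Int) (i : Nat)
    (h : i ≤ ws.length) : altGo future_ids (ws ++ [x]) i = altGo future_ids ws i := by
  induction i with
  | zero => rfl
  | succ j ih =>
      have hj : j < ws.length := h
      simp only [altGo, List.getD, List.getElem?_append_left hj, ih (Nat.le_of_lt hj)]
      rfl

theorem main_lemma (future_ids : List Int) (vals : List Int) :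
    (vals.foldl (stepV future_ids) (none, 0)).1 = altGo future_ids vals vals.length := by
  induction vals using List.reverseRecOn with
  | nil => rfl
  | append_singleton ws x ih =>
      rw [List.foldl_append]
      simp only [List.foldl, stepV, List.length_append, List.length_singleton]
      have hsnd := foldV_snd future_ids ws (none, (0 : Int))
      simp only [altGo, List.getD, List.getElem?_append_right (le_refl ws.length),
        Nat.sub_self, List.getElem?_cons_zero, Option.getD_some,
        altGo_append future_ids ws x ws.length (le_refl _)]
      rw [hsnd]
      by_cases hx : x ∈ future_ids <;> simp [hx, ih]

-- ===== VERDICT (by name: the statement is the Claim_ definition above) =====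
theorem eventCheck_spec : Claim_equal_eventCheck := by
  intro future_ids event_dict _ _
  unfold Spec_eventCheck eventCheck eventCheck_alt
  rw [foldA_eq_foldV, main_lemma]
  simp
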